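-- pv_equiv track=rewrite | github.com/2020202014Geeta/2020202014_Assignment3a | q2.py | daysInY2
-- ===== SOURCE A (Python) =====
-- month = [31,29,31,30,31,30,31,31,30,31,30,31]
--
-- def checkLeapYear(year):
--     if (year % 4) == 0:
--         if (year % 100) == 0:
--             if (year % 400) == 0:
--                 oddDays = 1
--             else:
--                 oddDays = 0
--         else:
--             oddDays = 1
--     else:
--         oddDays = 0
--     return oddDays
--
-- def daysInY2(m1,m2,y1,y2):
--     daysBefM2 = 0
--     if y1==y2:
--         return daysBefM2   # has checked in Y1 already
--
--     i = 1
--     while i < m2: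
--         if i==2:
--             daysBefM2 = daysBefM2 + month[i-1]
--             if checkLeapYear(y2)==0:   #if not a leap year subtract one
--                 daysBefM2 = daysBefM2 - 1
--         else:
--             daysBefM2 = daysBefM2 + month[i-1]
--         i = i + 1
--     return daysBefM2
-- ===== SOURCE B (Python) =====
-- month = [31,29,31,30,31,30,31,31,30,31,30,31]
--
-- def checkLeapYear(year):
--     if (year % 4) == 0:
--         if (year % 100) == 0:
--             if (year % 400) == 0:
--                 oddDays = 1
--             else:
--                 oddDays = 0
--         else:
--             oddDays = 1
--     else:
--         oddDays = 0
--     return oddDays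
--
-- # cumulative days in months 1..k (leap-year lengths, Feb=29)
-- _CUM = [0, 31, 60, 91, 121, 152, 182, 213, 244, 274, 305, 335, 366]
--
-- def daysInY2(m1, m2, y1, y2):
--     if y1 == y2 or m2 < 1:
--         return 0
--     total = _CUM[m2 - 1]
--     if m2 > 2 and checkLeapYear(y2) == 0:
--         total -= 1
--     return total
-- ===== Notes on version B (the rewrite author's own statement) =====
-- stated objective: simpler
-- what changed: Replaces the per-month while-loop accumulation with a single lookup in a 13-element cumulative prefix-sum table plus a closed-form February correction (subtract 1 when m2>2 and y2 is not a leap year).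
import Mathlib
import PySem

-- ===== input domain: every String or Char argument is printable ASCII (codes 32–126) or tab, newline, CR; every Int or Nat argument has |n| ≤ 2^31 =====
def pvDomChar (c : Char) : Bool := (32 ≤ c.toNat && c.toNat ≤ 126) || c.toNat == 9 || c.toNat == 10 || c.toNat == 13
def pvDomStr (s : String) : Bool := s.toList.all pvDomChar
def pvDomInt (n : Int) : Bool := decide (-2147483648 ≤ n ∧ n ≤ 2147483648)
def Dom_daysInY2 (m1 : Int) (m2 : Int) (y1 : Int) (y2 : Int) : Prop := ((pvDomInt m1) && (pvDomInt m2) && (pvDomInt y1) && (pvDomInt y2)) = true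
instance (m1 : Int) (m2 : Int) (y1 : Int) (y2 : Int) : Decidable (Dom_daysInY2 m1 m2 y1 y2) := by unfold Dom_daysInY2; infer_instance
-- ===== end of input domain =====

-- B replaces A's per-month accumulation loop by one lookup in a cumulative prefix-sum table plus a closed-form February correction (simpler).

-- ===== PORT A =====
-- shared module-level helper (identical in Source A and Source B)
def monthList : List Int := [31,29,31,30,31,30,31,31,30,31,30,31]

def checkLeapYear (year : Int) : Int :=
  if PySem.Int.mod year 4 = 0 then
    if PySem.Int.mod year 100 = 0 then
      if PySem.Int.mod year 400 = 0 then 1 else 0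
    else 1
  else 0

-- the 'while i < m2' loop of A; fuel = number of remaining iterations
def daysLoopA : Nat → Int → Int → Int → Int → Int
  | 0, _, acc, _, _ => acc
  | fuel+1, i, acc, m2, y2 =>
    if i < m2 then
      if i = 2 then
        let acc := acc + ((PySem.List.pyGet? monthList (i-1)).getD 0)
        let acc := if checkLeapYear y2 = 0 then acc - 1 else acc
        daysLoopA fuel (i+1) acc m2 y2
      else
        daysLoopA fuel (i+1) (acc + ((PySem.List.pyGet? monthList (i-1)).getD 0)) m2 y2
    else acc

def daysInY2 (m1 : Int) (m2 : Int) (y1 : Int) (y2 : Int) : Int :=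
  if y1 = y2 then 0
  else daysLoopA (m2 - 1).toNat 1 0 m2 y2

-- ===== PORT B =====
def cumTable : List Int := [0, 31, 60, 91, 121, 152, 182, 213, 244, 274, 305, 335, 366]

def daysInY2_alt (m1 : Int) (m2 : Int) (y1 : Int) (y2 : Int) : Int :=
  if y1 = y2 ∨ m2 < 1 then 0
  else
    let total := (PySem.List.pyGet? cumTable (m2 - 1)).getD 0
    if m2 > 2 ∧ checkLeapYear y2 = 0 then total - 1 else total

-- ===== PRECONDITION & SPEC =====
-- Pre_ excludes exactly the inputs where both Pythons raise IndexError: y1 ≠ y2 with m2 ≥ 14.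
def Pre_daysInY2 (m1 : Int) (m2 : Int) (y1 : Int) (y2 : Int) : Prop := y1 = y2 ∨ m2 ≤ 13
instance (m1 : Int) (m2 : Int) (y1 : Int) (y2 : Int) : Decidable (Pre_daysInY2 m1 m2 y1 y2) := by unfold Pre_daysInY2; infer_instance
def pvWitness_daysInY2 : Int × Int × Int × Int := (1, 5, 2000, 2001)

def Spec_daysInY2 (m1 : Int) (m2 : Int) (y1 : Int) (y2 : Int) (out : Int) : Prop := out = daysInY2_alt m1 m2 y1 y2
instance (m1 : Int) (m2 : Int) (y1 : Int) (y2 : Int) (out : Int) : Decidable (Spec_daysInY2 m1 m2 y1 y2 out) := by unfold Spec_daysInY2; infer_instance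

-- ===== CLAIM (what is proved, stated in full; the proofs are below) =====
def Claim_equal_daysInY2 : Prop := ∀ (m1 : Int) (m2 : Int) (y1 : Int) (y2 : Int), Dom_daysInY2 m1 m2 y1 y2 → Pre_daysInY2 m1 m2 y1 y2 → Spec_daysInY2 m1 m2 y1 y2 (daysInY2 m1 m2 y1 y2)

-- ===== LEMMAS AND PROOFS =====
lemma loop_eq (m2 y2 : Int) (h2 : 2 ≤ m2) (h13 : m2 ≤ 13) :
    daysLoopA (m2 - 1).toNat 1 0 m2 y2 =
      (if checkLeapYear y2 = 0 ∧ m2 > 2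
        then ((PySem.List.pyGet? cumTable (m2 - 1)).getD 0) - 1
        else (PySem.List.pyGet? cumTable (m2 - 1)).getD 0) := by
  interval_cases m2 <;>
    by_cases h : checkLeapYear y2 = 0 <;>
      simp [daysLoopA, monthList, cumTable, PySem.List.pyGet?, PySem.List.pyIdx?, h]

-- ===== VERDICT (by name: the statement is the Claim_ definition above) =====
theorem daysInY2_spec : Claim_equal_daysInY2 := by
  intro m1 m2 y1 y2 _hdom hpre
  unfold Spec_daysInY2 daysInY2 daysInY2_alt
  by_cases hy : y1 = y2
  · simp [hy]
  · have hm13 : m2 ≤ 13 := hpre.resolve_left hy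
    by_cases hm1 : m2 < 2
    · have hfuel : (m2 - 1).toNat ≤ 1 := by omega
      by_cases hm0 : m2 < 1
      · have : (m2 - 1).toNat = 0 := by omega
        simp [hy, hm0, this, daysLoopA]
      · have hm2 : m2 = 1 := by omega
        simp [hy, hm2, daysLoopA, cumTable, PySem.List.pyGet?, PySem.List.pyIdx?]
    · have h2 : 2 ≤ m2 := by omega
      rw [loop_eq m2 y2 h2 hm13]
      by_cases h : checkLeapYear y2 = 0 <;> by_cases h3 : m2 > 2 <;>
        simp [h, h3, hy, show ¬ m2 < 1 by omega]
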